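-- pv_equiv track=rewrite | github.com/projectringga-bit/CLI-SocialNet | utils.py | pad_line
-- ===== SOURCE A (Python) =====
-- import unicodedata
--
-- def visible_width(text):
--     width = 0
--
--     for char in text:
--         if unicodedata.east_asian_width(char) in ('F', 'W'):
--             width += 2
--         else:
--             width += 1
--
--     return width
--
-- def pad_line(text, width):
--     visible_length = visible_width(text)
--
--     padding = width - visible_length
--
--     if padding < 0:
--         result = ""
--         current_length = 0
--
--         for char in text:
--             if unicodedata.east_asian_width(char) in ('F', 'W'):
--                 char_length = 2
--             else:
--                 char_length = 1
--
--             if current_length + char_length > width: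
--                 break
--
--             result += char
--             current_length += char_length
--
--         return result
--
--     return text + " " * padding
-- ===== SOURCE B (Python) =====
-- import unicodedata
--
-- def pad_line(text, width):
--     result = ""
--     current = 0
--     for char in text:
--         w = 2 if unicodedata.east_asian_width(char) in ('F', 'W') else 1
--         if current + w > width:
--             return result
--         result += char
--         current += w
--     return result + " " * (width - current)
-- ===== Notes on version B (the rewrite author's own statement) =====
-- stated objective: simpler
-- what changed: Single pass that builds the result and running width together, returning the truncated prefix immediately when the width is exceeded and padding at the end, instead of A's separate visible_width pre-scan followed by a second truncation loop.
import Mathlib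
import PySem

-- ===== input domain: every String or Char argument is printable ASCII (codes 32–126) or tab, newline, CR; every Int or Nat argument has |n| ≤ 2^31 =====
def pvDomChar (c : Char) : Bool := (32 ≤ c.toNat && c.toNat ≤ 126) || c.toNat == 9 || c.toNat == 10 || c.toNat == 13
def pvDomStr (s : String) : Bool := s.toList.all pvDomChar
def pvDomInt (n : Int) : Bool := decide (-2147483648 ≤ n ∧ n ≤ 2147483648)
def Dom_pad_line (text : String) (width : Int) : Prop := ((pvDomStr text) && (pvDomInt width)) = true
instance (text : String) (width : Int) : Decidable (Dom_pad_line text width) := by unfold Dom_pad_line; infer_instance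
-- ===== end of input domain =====

-- B is a single pass that builds the result and running width together (simpler decomposition); A pre-scans for visible_width, then truncates in a second loop. Equal on all inputs.

-- unicodedata.east_asian_width(char) in ('F', 'W'): on the stated domain (printable ASCII, tab, LF, CR)
-- east_asian_width is never 'F' or 'W', so this test is exactly `false` there.
def eaWide (_c : Char) : Bool := false

-- width contribution of one character (2 if fullwidth/wide else 1)
def pvWeight (c : Char) : Int := if eaWide c then 2 else 1

-- ===== PORT A =====
-- strings are handled as their List Char (result += char → acc ++ [c]; " " * n → List.replicate), exact on the domain
def visible_width (text : String) : Int :=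
  text.toList.foldl (fun w c => w + pvWeight c) 0

-- A's truncation loop: for char in text: … break … ; result/current_length are the loop state
def padTruncA (width : Int) : List Char → List Char → Int → List Char
  | [], result, _ => result
  | c :: cs, result, current_length =>
    let char_length := pvWeight c
    if current_length + char_length > width then result
    else padTruncA width cs (result ++ [c]) (current_length + char_length)

def pad_line (text : String) (width : Int) : String :=
  let visible_length := visible_width text
  let padding := width - visible_length
  if padding < 0 then String.ofList (padTruncA width text.toList [] 0)
  else String.ofList (text.toList ++ List.replicate padding.toNat ' ')

-- ===== PORT B =====
-- B's single pass: accumulate result and running width; return prefix on overflow, pad at the end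
def goB (width : Int) : List Char → List Char → Int → List Char
  | [], acc, cw => acc ++ List.replicate (width - cw).toNat ' '
  | c :: cs, acc, cw =>
    let w := pvWeight c
    if cw + w > width then acc
    else goB width cs (acc ++ [c]) (cw + w)

def pad_line_alt (text : String) (width : Int) : String :=
  String.ofList (goB width text.toList [] 0)

-- ===== PRECONDITION & SPEC =====
def Spec_pad_line (text : String) (width : Int) (out : String) : Prop := out = pad_line_alt text width
instance (text : String) (width : Int) (out : String) : Decidable (Spec_pad_line text width out) := by unfold Spec_pad_line; infer_instance

-- ===== CLAIM (what is proved, stated in full; the proofs are below) =====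
def Claim_equal_pad_line : Prop := ∀ (text : String) (width : Int), Dom_pad_line text width → Spec_pad_line text width (pad_line text width)

-- ===== LEMMAS AND PROOFS =====

def pvWsum (cs : List Char) : Int := (cs.map pvWeight).sum

theorem pvWeight_eq (c : Char) : pvWeight c = 1 := by simp [pvWeight, eaWide]

theorem pvWsum_nonneg (cs : List Char) : 0 ≤ pvWsum cs := by
  induction cs with
  | nil => simp [pvWsum]
  | cons c cs ih => simp only [pvWsum, List.map_cons, List.sum_cons] at *; have := pvWeight_eq c; omega

theorem foldl_weight (cs : List Char) (a : Int) :
    cs.foldl (fun w c => w + pvWeight c) a = a + pvWsum cs := by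
  induction cs generalizing a with
  | nil => simp [pvWsum]
  | cons c cs ih => simp only [List.foldl_cons, pvWsum, List.map_cons, List.sum_cons] at *
                    rw [ih]; ring

-- when the whole suffix fits, B copies it and pads
theorem goB_fits (width : Int) (cs : List Char) (acc : List Char) (cw : Int)
    (h : cw + pvWsum cs ≤ width) :
    goB width cs acc cw = acc ++ cs ++ List.replicate (width - (cw + pvWsum cs)).toNat ' ' := by
  induction cs generalizing acc cw with
  | nil => simp [goB, pvWsum]
  | cons c cs ih =>
    have hc := pvWeight_eq c
    have hnn := pvWsum_nonneg cs
    have hsum : pvWsum (c :: cs) = pvWeight c + pvWsum cs := by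
      simp [pvWsum]
    rw [hsum] at h
    have hnot : ¬ (cw + pvWeight c > width) := by omega
    simp only [goB, hnot, if_false]
    rw [ih (acc ++ [c]) (cw + pvWeight c) (by omega)]
    simp [hsum]
    ring_nf

-- when the suffix does not fit, B runs exactly A's truncation loop
theorem goB_trunc (width : Int) (cs : List Char) (acc : List Char) (cw : Int)
    (h : width < cw + pvWsum cs) :
    goB width cs acc cw = padTruncA width cs acc cw := by
  induction cs generalizing acc cw with
  | nil =>
    simp only [pvWsum, List.map_nil, List.sum_nil, add_zero] at h
    have : (width - cw).toNat = 0 := by omega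
    simp [goB, padTruncA, this]
  | cons c cs ih =>
    have hsum : pvWsum (c :: cs) = pvWeight c + pvWsum cs := by simp [pvWsum]
    rw [hsum] at h
    by_cases hb : cw + pvWeight c > width
    · simp [goB, padTruncA, hb]
    · simp only [goB, padTruncA, hb, if_false]
      exact ih (acc ++ [c]) (cw + pvWeight c) (by omega)

-- ===== VERDICT (by name: the statement is the Claim_ definition above) =====
theorem pad_line_spec : Claim_equal_pad_line := by
  intro text width _
  unfold Spec_pad_line pad_line pad_line_alt visible_width
  rw [foldl_weight]
  simp only [zero_add]
  by_cases h : width - pvWsum text.toList < 0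
  · rw [if_pos h, goB_trunc width text.toList [] 0 (by omega)]
  · rw [if_neg h, goB_fits width text.toList [] 0 (by omega)]
    simp
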